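-- pv_equiv track=rewrite | github.com/INK-USC/expl-refinement | matcher/Model/phrase_matcher_fill.py | seq2spans
-- ===== SOURCE A (Python) =====
-- def seq2spans(seq):
--     spans, curr_start, in_span = [], None, False
--     for i in range(len(seq)):
--         if not seq[i] and in_span:
--             spans.append((curr_start, i))
--             in_span = False
--             curr_start = None
--         elif seq[i] and not in_span:
--             in_span = True
--             curr_start = i
--
--     return spans
-- ===== SOURCE B (Python) =====
-- def seq2spans(seq):
--     rises = [i for i in range(len(seq)) if seq[i] and (i == 0 or not seq[i - 1])]
--     falls = [i for i in range(len(seq)) if not seq[i] and i > 0 and seq[i - 1]]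
--     return list(zip(rises, falls))
-- ===== Notes on version B (the rewrite author's own statement) =====
-- stated objective: simpler
-- what changed: Replaces A's in_span/curr_start state machine with two index comprehensions (run starts and run ends) zipped together, which also naturally drops an unclosed trailing run just as A does.
import Mathlib
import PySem

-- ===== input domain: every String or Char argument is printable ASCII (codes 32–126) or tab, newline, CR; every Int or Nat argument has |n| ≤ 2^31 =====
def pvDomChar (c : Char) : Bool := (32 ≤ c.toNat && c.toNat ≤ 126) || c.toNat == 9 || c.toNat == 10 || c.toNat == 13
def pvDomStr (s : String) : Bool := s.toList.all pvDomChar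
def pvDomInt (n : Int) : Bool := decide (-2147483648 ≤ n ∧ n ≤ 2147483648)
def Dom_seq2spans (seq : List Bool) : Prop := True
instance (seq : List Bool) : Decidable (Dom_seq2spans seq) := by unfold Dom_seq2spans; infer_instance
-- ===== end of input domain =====

-- B replaces A's in_span/curr_start state machine by two index comprehensions
-- (run starts and run ends) zipped together; same cost, simpler decomposition.

-- ===== PORT A =====
-- state = (spans, curr_start, in_span); curr_start is Option Int (Python's None),
-- read with .getD 0 only in the branch where in_span guarantees it is set.
def seq2spans (seq : List Bool) : List (Int × Int) :=
  ((List.range seq.length).foldl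
    (fun (st : List (Int × Int) × Option Int × Bool) i =>
      if !(seq.getD i false) && st.2.2 then
        (st.1 ++ [(st.2.1.getD 0, (i : Int))], (none, false))
      else if seq.getD i false && !st.2.2 then
        (st.1, (some (i : Int), true))
      else st)
    ([], (none, false))).1

-- ===== PORT B =====
def seq2spans_alt (seq : List Bool) : List (Int × Int) :=
  let rises := (List.range seq.length).filter
    (fun i => seq.getD i false && (decide (i = 0) || !(seq.getD (i - 1) false)))
  let falls := (List.range seq.length).filter
    (fun i => !(seq.getD i false) && decide (0 < i) && seq.getD (i - 1) false)
  (rises.zip falls).map (fun p => ((p.1 : Int), (p.2 : Int)))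

-- ===== PRECONDITION & SPEC =====
def Spec_seq2spans (seq : List Bool) (out : List (Int × Int)) : Prop := out = seq2spans_alt seq
instance (seq : List Bool) (out : List (Int × Int)) : Decidable (Spec_seq2spans seq out) := by unfold Spec_seq2spans; infer_instance

-- ===== CLAIM (what is proved, stated in full; the proofs are below) =====
def Claim_equal_seq2spans : Prop := ∀ (seq : List Bool), Dom_seq2spans seq → Spec_seq2spans seq (seq2spans seq)

-- ===== LEMMAS AND PROOFS =====

-- zipping two cast lists = casting the zipped pairs
theorem pv_zip_map_cast (A B : List Nat) :
    (A.map (fun i => (i : Int))).zip (B.map (fun i => (i : Int)))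
      = (A.zip B).map (fun p => ((p.1 : Int), (p.2 : Int))) := by
  induction A generalizing B with
  | nil => simp
  | cons a t ih =>
      cases B with
      | nil => rfl
      | cons b u =>
          simp only [List.map_cons, List.zip_cons_cons]
          exact congrArg _ (ih u)

-- A's fold, abstracted over the element-lookup function g and the index list.
def pvA (g : Nat → Bool) (l : List Nat) (st : List (Int × Int) × Option Int × Bool) :
    List (Int × Int) × Option Int × Bool :=
  l.foldl
    (fun (st : List (Int × Int) × Option Int × Bool) i =>
      if !(g i) && st.2.2 then
        (st.1 ++ [(st.2.1.getD 0, (i : Int))], (none, false))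
      else if g i && !st.2.2 then
        (st.1, (some (i : Int), true))
      else st) st

-- B's rise/fall index lists (already cast to Int), abstracted the same way.
def pvR (g : Nat → Bool) (l : List Nat) : List Int :=
  (l.filter (fun i => g i && (decide (i = 0) || !(g (i - 1))))).map (fun i => (i : Int))
def pvF (g : Nat → Bool) (l : List Nat) : List Int :=
  (l.filter (fun i => !(g i) && decide (0 < i) && g (i - 1))).map (fun i => (i : Int))

-- Core invariant, by induction on the remaining index block range' k m:
-- (a) when not in a span (and the previous element, if any, is false),
--     A's fold appends exactly zip(rises, falls) of the block;
-- (b) when inside a span started at s (previous element true), the pending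
--     start s is prepended to the rises before zipping.
theorem pvA_zip (g : Nat → Bool) (m : Nat) : ∀ (k : Nat),
    (∀ (acc : List (Int × Int)) (cs : Option Int), (k = 0 ∨ g (k - 1) = false) →
      (pvA g (List.range' k m) (acc, cs, false)).1
        = acc ++ List.zip (pvR g (List.range' k m)) (pvF g (List.range' k m)))
    ∧
    (∀ (acc : List (Int × Int)) (s : Int), (0 < k ∧ g (k - 1) = true) →
      (pvA g (List.range' k m) (acc, some s, true)).1
        = acc ++ List.zip (s :: pvR g (List.range' k m)) (pvF g (List.range' k m))) := by
  induction m with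
  | zero =>
      intro k
      constructor
      · intro acc cs _; simp [pvA, pvR, pvF]
      · intro acc s _; simp [pvA, pvR, pvF]
  | succ m ih =>
      intro k
      have hkk : k + 1 - 1 = k := by omega
      constructor
      · intro acc cs hp
        by_cases hg : g k = true
        · have hstart : (decide (k = 0) || !(g (k - 1))) = true := by
            rcases hp with h | h <;> simp [h]
          simp only [List.range'_succ, pvA, List.foldl_cons, pvR, pvF,
            List.filter_cons, hg, hstart]
          simp only [Bool.not_true, Bool.false_and, Bool.not_false,
            Bool.and_false, Bool.and_true, if_true]
          have := (ih (k + 1)).2 acc ((k : Nat) : Int) ⟨by omega, by simpa [hkk] using hg⟩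
          simpa [pvA, pvR, pvF, List.zip_cons_cons] using this
        · have hg' : g k = false := by simpa using hg
          simp only [List.range'_succ, pvA, List.foldl_cons, pvR, pvF,
            List.filter_cons, hg']
          simp only [Bool.not_false, Bool.and_false, Bool.false_and, Bool.true_and]
          have hnot : ¬(0 < k ∧ g (k - 1) = true) := by
            rcases hp with h | h <;> simp [h]
          have := (ih (k + 1)).1 acc cs (Or.inr (by simpa [hkk] using hg'))
          simpa [pvA, pvR, pvF, hnot] using this
      · intro acc s hp
        obtain ⟨hk0, hprev⟩ := hp
        by_cases hg : g k = true
        · simp only [List.range'_succ, pvA, List.foldl_cons, pvR, pvF,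
            List.filter_cons, hg]
          simp only [Bool.not_true, Bool.false_and, Bool.and_true, Bool.and_false]
          have hnot : ¬(k = 0 ∨ g (k - 1) = false) := by simp [hprev]; omega
          have := (ih (k + 1)).2 acc s ⟨by omega, by simpa [hkk] using hg⟩
          simpa [pvA, pvR, pvF, hnot] using this
        · have hg' : g k = false := by simpa using hg
          simp only [List.range'_succ, pvA, List.foldl_cons, pvR, pvF,
            List.filter_cons, hg']
          simp only [Bool.not_false, Bool.true_and, Bool.false_and,
            reduceIte, Option.getD_some]
          have hpos : 0 < k ∧ g (k - 1) = true := ⟨hk0, hprev⟩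
          have := (ih (k + 1)).1 (acc ++ [(s, ((k : Nat) : Int))]) none
            (Or.inr (by simpa [hkk] using hg'))
          simpa [pvA, pvR, pvF, hpos, List.zip_cons_cons, List.append_assoc] using this

-- ===== VERDICT (by name: the statement is the Claim_ definition above) =====
theorem seq2spans_spec : Claim_equal_seq2spans := by
  intro seq _
  unfold Spec_seq2spans
  have hA : seq2spans seq
      = (pvA (fun i => seq.getD i false) (List.range seq.length) ([], (none, false))).1 := rfl
  have hz := (pvA_zip (fun i => seq.getD i false) seq.length 0).1 [] none (Or.inl rfl)
  rw [hA, List.range_eq_range', hz, List.nil_append]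
  unfold seq2spans_alt pvR pvF
  rw [List.range_eq_range']
  exact pv_zip_map_cast _ _
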